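-- pv_equiv track=rewrite | github.com/WagnerMarcus/algoBio1 | src/MSS.py | MSS_Short_Inverse_Naive
-- ===== SOURCE A (Python) =====
-- from typing import List
--
-- def MSS_Short_Inverse_Naive(a: List[int], n: int):
--     """
--     Naive maximum scoring subsequence algorithm for shortest solution from Tutor-session 1.
--     :param a: Array of integers (aka our sequence)
--     :param n: length of Array a
--     :return: A shortest maximal scoring subsequence as interval (i, j)
--     """
--
--     # always is maxscore = σ(l, r)
--     maxscore, l, r = 0, 0, 0
--
--     for i in range(n, 0, -1):
--         for j in range(i, n):
--
--             # compute s = σ(i, j)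
--             s = 0
--             for k in range(i, j):
--                 s = s + a[k]
--             if s > maxscore:
--                 maxscore, l, r = s, i, j
--
--     return maxscore, l + 1, r
-- ===== SOURCE B (Python) =====
-- from typing import List
--
-- def MSS_Short_Inverse_Naive(a: List[int], n: int):
--     # One backward Kadane-style sweep:
--     # T = suffix score sigma(i, n-1); (m, bj) = minimum suffix score over
--     # j in [i, n-1] with its smallest attaining j; the best interval starting
--     # at i then scores T - m, and scanning i downward with strict '>' keeps
--     # exactly A's tie-breaking (largest start, then shortest interval).
--     maxscore, l, r = 0, 0, 0
--     T, m, bj = 0, 0, n - 1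
--     for i in range(n - 2, 0, -1):
--         T += a[i]
--         if T <= m:
--             m, bj = T, i
--         sc = T - m
--         if sc > maxscore:
--             maxscore, l, r = sc, i, bj
--     return maxscore, l + 1, r
-- ===== Notes on version B (the rewrite author's own statement) =====
-- stated objective: alternative
-- what changed: B replaces A's triple loop over all intervals by a single backward Kadane-style sweep that maintains the running suffix score and the leftmost minimum suffix score, reproducing A's exact tie-breaking (largest start, then shortest interval).
import Mathlib
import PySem

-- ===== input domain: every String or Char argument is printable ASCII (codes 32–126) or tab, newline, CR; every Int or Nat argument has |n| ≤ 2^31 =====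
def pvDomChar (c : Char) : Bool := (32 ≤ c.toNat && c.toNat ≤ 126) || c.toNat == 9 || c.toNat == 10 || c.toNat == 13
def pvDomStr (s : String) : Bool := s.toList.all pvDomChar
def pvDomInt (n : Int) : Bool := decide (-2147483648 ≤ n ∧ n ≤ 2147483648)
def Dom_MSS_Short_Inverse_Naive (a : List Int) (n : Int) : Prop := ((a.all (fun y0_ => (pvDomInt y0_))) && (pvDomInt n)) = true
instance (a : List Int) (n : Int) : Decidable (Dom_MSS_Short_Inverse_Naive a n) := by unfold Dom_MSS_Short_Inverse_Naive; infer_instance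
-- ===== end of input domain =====

-- B replaces A's triple loop over all intervals by one backward Kadane-style sweep
-- (running suffix score + leftmost minimum suffix score); same return value.

-- ===== PORT A =====
-- s = sum of a[k] for k in range(i, j)
def sigmaA (a : List Int) (i j : Int) : Int :=
  (PySem.List.pyRange i j 1).foldl (fun s k => s + PySem.List.pyGetD a k 0) 0

-- body of A's middle loop (state = (maxscore, l, r))
def stepA (a : List Int) (i : Int) (st : Int × Int × Int) (j : Int) : Int × Int × Int :=
  let s := sigmaA a i j
  if s > st.1 then (s, i, j) else st

def MSS_Short_Inverse_Naive (a : List Int) (n : Int) : List Int :=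
  let st := (PySem.List.pyRange n 0 (-1)).foldl
      (fun st i => (PySem.List.pyRange i n 1).foldl (stepA a i) st)
      ((0 : Int), (0 : Int), (0 : Int))
  [st.1, st.2.1 + 1, st.2.2]

-- ===== PORT B =====
-- body of B's single loop; state = ((maxscore, l, r), (T, m, bj)):
-- T += a[i]; if T <= m: m, bj = T, i; sc = T - m; if sc > maxscore: maxscore, l, r = sc, i, bj
def stepB (a : List Int) (st : (Int × Int × Int) × (Int × Int × Int)) (i : Int) :
    (Int × Int × Int) × (Int × Int × Int) :=
  let T := st.2.1 + PySem.List.pyGetD a i 0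
  let mb := if T ≤ st.2.2.1 then (T, i) else (st.2.2.1, st.2.2.2)
  let sc := T - mb.1
  ((if sc > st.1.1 then (sc, i, mb.2) else st.1), (T, mb.1, mb.2))

def MSS_Short_Inverse_Naive_alt (a : List Int) (n : Int) : List Int :=
  let st := (PySem.List.pyRange (n - 2) 0 (-1)).foldl (stepB a)
      (((0 : Int), (0 : Int), (0 : Int)), ((0 : Int), (0 : Int), n - 1))
  [st.1.1, st.1.2.1 + 1, st.1.2.2]

-- ===== PRECONDITION & SPEC =====
-- A raises IndexError (a[k]) exactly when n ≥ 3 and n > len(a) + 1; Pre_ admits everything else.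
def Pre_MSS_Short_Inverse_Naive (a : List Int) (n : Int) : Prop :=
  n ≤ 2 ∨ n ≤ (a.length : Int) + 1
instance (a : List Int) (n : Int) : Decidable (Pre_MSS_Short_Inverse_Naive a n) := by
  unfold Pre_MSS_Short_Inverse_Naive; infer_instance

def pvWitness_MSS_Short_Inverse_Naive : List Int × Int := ([1, -2, 3, 1], 4)

def Spec_MSS_Short_Inverse_Naive (a : List Int) (n : Int) (out : List Int) : Prop := out = MSS_Short_Inverse_Naive_alt a n
instance (a : List Int) (n : Int) (out : List Int) : Decidable (Spec_MSS_Short_Inverse_Naive a n out) := by unfold Spec_MSS_Short_Inverse_Naive; infer_instance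

-- ===== CLAIM (what is proved, stated in full; the proofs are below) =====
def Claim_equal_MSS_Short_Inverse_Naive : Prop := ∀ (a : List Int) (n : Int), Dom_MSS_Short_Inverse_Naive a n → Pre_MSS_Short_Inverse_Naive a n → Spec_MSS_Short_Inverse_Naive a n (MSS_Short_Inverse_Naive a n)

-- ===== LEMMAS AND PROOFS =====

-- segment sum a[i] + ... + a[j-1] (virtual: pyGetD with default 0)
def seg (a : List Int) (i j : Int) : Int :=
  ((PySem.List.pyRange i j 1).map (fun k => PySem.List.pyGetD a k 0)).sum

lemma foldl_add_sum (g : Int → Int) (L : List Int) (s : Int) :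
    L.foldl (fun s k => s + g k) s = s + (L.map g).sum := by
  induction L generalizing s with
  | nil => simp
  | cons x t ih =>
      simp only [List.foldl_cons, List.map_cons, List.sum_cons]
      rw [ih]; ring

lemma sigmaA_eq_seg (a : List Int) (i j : Int) : sigmaA a i j = seg a i j := by
  unfold sigmaA seg
  rw [foldl_add_sum]; ring

lemma seg_split (a : List Int) (i j b : Int) (h1 : i ≤ j) (h2 : j ≤ b) :
    seg a i b = seg a i j + seg a j b := by
  unfold seg
  rw [PySem.List.pyRange_one_append i j b h1 h2, List.map_append, List.sum_append]

lemma seg_nil (a : List Int) (i : Int) : seg a i i = 0 := by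
  unfold seg
  rw [PySem.List.pyRange_one_eq_nil (le_refl i)]
  rfl

lemma sigmaA_self (a : List Int) (i : Int) : sigmaA a i i = 0 := by
  unfold sigmaA
  rw [PySem.List.pyRange_one_eq_nil (le_refl i)]
  rfl

lemma seg_cons (a : List Int) (i b : Int) (h : i < b) :
    seg a i b = PySem.List.pyGetD a i 0 + seg a (i + 1) b := by
  unfold seg
  rw [PySem.List.pyRange_one_cons h, List.map_cons, List.sum_cons]

-- leftmost minimum of f over a list, with its index
def lmin (f : Int → Int) : List Int → Int × Int
  | [] => (0, 0)
  | [x] => (f x, x)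
  | x :: y :: ys =>
      if f x ≤ (lmin f (y :: ys)).1 then (f x, x) else lmin f (y :: ys)

-- A's inner loop over candidates c - f j, characterised by the leftmost minimum of f
lemma innerFold (f : Int → Int) (c i : Int) (L : List Int) (hL : L ≠ [])
    (st : Int × Int × Int) :
    L.foldl (fun st j => if c - f j > st.1 then (c - f j, i, j) else st) st
      = (if c - (lmin f L).1 > st.1 then (c - (lmin f L).1, i, (lmin f L).2) else st) := by
  induction L generalizing st with
  | nil => exact absurd rfl hL
  | cons x t ih =>
      cases t with
      | nil => simp [lmin]
      | cons y ys =>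
          rw [List.foldl_cons, ih (by simp)]
          have hx : lmin f (x :: y :: ys)
              = if f x ≤ (lmin f (y :: ys)).1 then (f x, x) else lmin f (y :: ys) := rfl
          rw [hx]
          generalize lmin f (y :: ys) = q
          obtain ⟨m', j'⟩ := q
          dsimp only
          split_ifs <;> first | rfl | (exfalso; omega)

-- the single lockstep induction: A's remaining outer loop equals B's remaining loop,
-- given B's auxiliary-state invariant
lemma lockstep (a : List Int) (n : Int) (d : Nat) :
    ∀ (i0 : Int), i0 = (d : Int) → i0 ≤ n - 2 →
    ∀ (st : Int × Int × Int) (m bj : Int),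
      (m, bj) = lmin (fun j => seg a j (n - 1)) (PySem.List.pyRange (i0 + 1) n 1) →
      (PySem.List.pyRange i0 0 (-1)).foldl
          (fun st i => (PySem.List.pyRange i n 1).foldl (stepA a i) st) st
        = ((PySem.List.pyRange i0 0 (-1)).foldl (stepB a)
            (st, (seg a (i0 + 1) (n - 1), m, bj))).1 := by
  induction d with
  | zero =>
      intro i0 hd _ st m bj _
      rw [PySem.List.pyRange_neg_one_eq_nil (by omega)]
      rfl
  | succ k ih =>
      intro i0 hd hin st m bj hmb
      have h0 : (0 : Int) < i0 := by omega
      rw [PySem.List.pyRange_neg_one_cons (by omega)]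
      rw [List.foldl_cons, List.foldl_cons]
      -- abbreviations
      set f : Int → Int := fun j => seg a j (n - 1) with hf
      have hT : seg a (i0 + 1) (n - 1) + PySem.List.pyGetD a i0 0 = f i0 := by
        rw [hf]; dsimp only
        rw [seg_cons a i0 (n - 1) (by omega)]; ring
      -- the j-range at i0 is nonempty and splits as i0 :: (i0+1) :: …
      have hcons1 : PySem.List.pyRange i0 n 1 = i0 :: PySem.List.pyRange (i0 + 1) n 1 :=
        PySem.List.pyRange_one_cons (show i0 < n by omega)
      have hcons2 : PySem.List.pyRange (i0 + 1) n 1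
          = (i0 + 1) :: PySem.List.pyRange (i0 + 2) n 1 := by
        rw [PySem.List.pyRange_one_cons (show i0 + 1 < n by omega)]
        have h11 : i0 + 1 + 1 = i0 + 2 := by ring
        rw [h11]
      -- lmin over the new range, from the old one
      have hlm : lmin f (PySem.List.pyRange i0 n 1)
          = if f i0 ≤ m then (f i0, i0) else (m, bj) := by
        rw [hcons1, hcons2]
        have : lmin f (i0 :: (i0 + 1) :: PySem.List.pyRange (i0 + 2) n 1)
            = if f i0 ≤ (lmin f ((i0 + 1) :: PySem.List.pyRange (i0 + 2) n 1)).1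
              then (f i0, i0)
              else lmin f ((i0 + 1) :: PySem.List.pyRange (i0 + 2) n 1) := rfl
        rw [this, ← hcons2, ← hmb]
      -- A's inner loop at i0, via the abstract characterisation
      have hstepA : (PySem.List.pyRange i0 n 1).foldl (stepA a i0) st
          = (PySem.List.pyRange i0 n 1).foldl
              (fun st j => if f i0 - f j > st.1 then (f i0 - f j, i0, j) else st) st := by
        apply PySem.List.foldl_congr_mem
        intro acc j hj
        have hj' := (PySem.List.mem_pyRange_one).1 hj
        unfold stepA
        rw [sigmaA_eq_seg,
            show seg a i0 j = f i0 - f j by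
              rw [hf]; dsimp only
              rw [seg_split a i0 j (n - 1) (by omega) (by omega)]; ring]
      have hinner := innerFold f (f i0) i0 (PySem.List.pyRange i0 n 1)
          (by rw [hcons1]; simp) st
      -- B's step at i0
      have hB : stepB a (st, (seg a (i0 + 1) (n - 1), m, bj)) i0
          = ((if f i0 - (lmin f (PySem.List.pyRange i0 n 1)).1 > st.1
              then (f i0 - (lmin f (PySem.List.pyRange i0 n 1)).1, i0,
                    (lmin f (PySem.List.pyRange i0 n 1)).2)
              else st),
             (f i0, (lmin f (PySem.List.pyRange i0 n 1)).1,
                    (lmin f (PySem.List.pyRange i0 n 1)).2)) := by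
        unfold stepB
        dsimp only
        rw [hT, hlm]
      rw [hstepA, hinner, hB]
      -- apply the induction hypothesis at i0 - 1
      have hTnext : f i0 = seg a ((i0 - 1) + 1) (n - 1) := by
        rw [hf]; dsimp only; congr 1; omega
      have hlmnext : ((lmin f (PySem.List.pyRange i0 n 1)).1,
                      (lmin f (PySem.List.pyRange i0 n 1)).2)
          = lmin f (PySem.List.pyRange ((i0 - 1) + 1) n 1) := by
        have : (i0 - 1) + 1 = i0 := by omega
        rw [this]
      have := ih (i0 - 1) (by omega) (by omega)
          (if f i0 - (lmin f (PySem.List.pyRange i0 n 1)).1 > st.1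
            then (f i0 - (lmin f (PySem.List.pyRange i0 n 1)).1, i0,
                  (lmin f (PySem.List.pyRange i0 n 1)).2)
            else st)
          (lmin f (PySem.List.pyRange i0 n 1)).1
          (lmin f (PySem.List.pyRange i0 n 1)).2
          (by rw [hlmnext])
      rw [this, ← hTnext]

-- for n ≤ 2 A's outer loop never changes the state (0,0,0)
lemma outer_noop (a : List Int) (n : Int) (_hn : n ≤ 2) (L : List Int)
    (hL : ∀ i ∈ L, 1 ≤ i) :
    L.foldl (fun st i => (PySem.List.pyRange i n 1).foldl (stepA a i) st)
        ((0 : Int), (0 : Int), (0 : Int))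
      = ((0 : Int), (0 : Int), (0 : Int)) := by
  induction L with
  | nil => rfl
  | cons i t ih =>
      rw [List.foldl_cons]
      have hi : 1 ≤ i := hL i (List.mem_cons_self ..)
      have hinner : (PySem.List.pyRange i n 1).foldl (stepA a i)
          ((0 : Int), (0 : Int), (0 : Int)) = ((0 : Int), (0 : Int), (0 : Int)) := by
        by_cases h : n ≤ i
        · rw [PySem.List.pyRange_one_eq_nil h]; rfl
        · rw [PySem.List.pyRange_one_cons (by omega),
              PySem.List.pyRange_one_eq_nil (by omega : n ≤ i + 1)]
          simp only [List.foldl_cons, List.foldl_nil]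
          simp [stepA, sigmaA_self]
      rw [hinner]
      exact ih (fun x hx => hL x (List.mem_cons_of_mem _ hx))

-- A's first two outer iterations (i = n and i = n - 1) leave (0,0,0) unchanged
lemma firstTwo (a : List Int) (n : Int) (_hn : 3 ≤ n) :
    (PySem.List.pyRange (n - 1) n 1).foldl (stepA a (n - 1))
        ((PySem.List.pyRange n n 1).foldl (stepA a n) ((0 : Int), (0 : Int), (0 : Int)))
      = ((0 : Int), (0 : Int), (0 : Int)) := by
  rw [PySem.List.pyRange_one_eq_nil (le_refl n)]
  have h1 : PySem.List.pyRange (n - 1) n 1 = [n - 1] := by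
    rw [PySem.List.pyRange_one_cons (by omega),
        PySem.List.pyRange_one_eq_nil (by omega : n ≤ (n - 1) + 1)]
  rw [h1]
  simp only [List.foldl_cons, List.foldl_nil]
  simp [stepA, sigmaA_self]

-- ===== VERDICT (by name: the statement is the Claim_ definition above) =====
theorem MSS_Short_Inverse_Naive_spec : Claim_equal_MSS_Short_Inverse_Naive := by
  intro a n _ _
  unfold Spec_MSS_Short_Inverse_Naive MSS_Short_Inverse_Naive MSS_Short_Inverse_Naive_alt
  by_cases hn : n ≤ 2
  · rw [PySem.List.pyRange_neg_one_eq_nil (by omega : n - 2 ≤ 0),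
        outer_noop a n hn _ (fun i hi => ((PySem.List.mem_pyRange_neg_one).1 hi).1)]
    rfl
  · have h3 : (3 : Int) ≤ n := by omega
    have hsplit : PySem.List.pyRange n 0 (-1)
        = n :: (n - 1) :: PySem.List.pyRange (n - 2) 0 (-1) := by
      rw [PySem.List.pyRange_neg_one_cons (by omega : (0:Int) < n),
          PySem.List.pyRange_neg_one_cons (by omega : (0:Int) < n - 1)]
      have h12 : n - 1 - 1 = n - 2 := by ring
      rw [h12]
    rw [hsplit, List.foldl_cons, List.foldl_cons]
    dsimp only
    rw [firstTwo a n h3]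
    have hseg : seg a ((n - 2) + 1) (n - 1) = 0 := by
      have : (n - 2) + 1 = n - 1 := by omega
      rw [this, seg_nil]
    have hlm0 : ((0 : Int), n - 1)
        = lmin (fun j => seg a j (n - 1)) (PySem.List.pyRange ((n - 2) + 1) n 1) := by
      have h1 : PySem.List.pyRange ((n - 2) + 1) n 1 = [n - 1] := by
        rw [show (n - 2) + 1 = n - 1 by omega]
        rw [PySem.List.pyRange_one_cons (by omega),
            PySem.List.pyRange_one_eq_nil (by omega : n ≤ (n - 1) + 1)]
      rw [h1]
      show ((0 : Int), n - 1) = (seg a (n - 1) (n - 1), n - 1)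
      rw [seg_nil]
    have := lockstep a n (n - 2).toNat (n - 2) (by omega) (by omega)
        ((0 : Int), (0 : Int), (0 : Int)) 0 (n - 1) hlm0
    rw [this, hseg]
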